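-- pv_equiv track=rewrite | github.com/UniVenture-Solutions/openclaw_bridge | openclaw_bridge/bridge/sql_guard.py | _strip_string_literals
-- ===== SOURCE A (Python) =====
-- def _strip_string_literals(sql: str) -> str:
--     out = []
--     in_single = False
--     in_double = False
--     for ch in sql:
--         if ch == "'" and not in_double:
--             in_single = not in_single
--             out.append(" ")
--             continue
--         if ch == '"' and not in_single:
--             in_double = not in_double
--             out.append(" ")
--             continue
--         if in_single or in_double:
--             out.append(" ")
--         else:
--             out.append(ch)
--     return "".join(out)
-- ===== SOURCE B (Python) =====
-- def _strip_string_literals(sql: str) -> str: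
--     out = []
--     i = 0
--     n = len(sql)
--     while i < n:
--         ch = sql[i]
--         if ch == "'" or ch == '"':
--             j = sql.find(ch, i + 1)
--             if j == -1:
--                 out.append(" " * (n - i))
--                 i = n
--             else:
--                 out.append(" " * (j - i + 1))
--                 i = j + 1
--         else:
--             out.append(ch)
--             i += 1
--     return "".join(out)
-- ===== Notes on version B (the rewrite author's own statement) =====
-- stated objective: idiomatic
-- what changed: Replaced the per-character in_single/in_double state machine with a chunk-wise scan that, on meeting a quote, locates the matching quote with str.find and blanks the whole literal in one slice-sized step.
import Mathlib
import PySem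

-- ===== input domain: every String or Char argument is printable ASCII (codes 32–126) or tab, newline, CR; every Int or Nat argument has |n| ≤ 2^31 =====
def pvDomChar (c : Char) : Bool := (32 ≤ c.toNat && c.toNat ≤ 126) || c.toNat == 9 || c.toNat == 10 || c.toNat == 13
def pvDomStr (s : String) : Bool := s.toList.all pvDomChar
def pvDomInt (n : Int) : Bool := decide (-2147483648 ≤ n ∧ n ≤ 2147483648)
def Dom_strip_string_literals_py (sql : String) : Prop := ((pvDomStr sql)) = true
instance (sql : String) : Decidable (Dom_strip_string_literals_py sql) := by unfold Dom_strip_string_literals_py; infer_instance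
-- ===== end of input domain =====

-- B replaces A's per-character quote-state machine by a chunk-wise scan that blanks each
-- whole quoted literal at once (idiomatic; same asymptotic cost).

-- ===== PORT A =====
-- A's loop over the characters with the two boolean flags, transcribed branch for branch.
def stripALoop : List Char → Bool → Bool → List Char
  | [], _, _ => []
  | ch :: rest, in_single, in_double =>
    if ch = '\'' ∧ ¬in_double then ' ' :: stripALoop rest (!in_single) in_double
    else if ch = '"' ∧ ¬in_single then ' ' :: stripALoop rest in_single (!in_double)
    else if in_single ∨ in_double then ' ' :: stripALoop rest in_single in_double
    else ch :: stripALoop rest in_single in_double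

def strip_string_literals_py (sql : String) : String :=
  String.mk (stripALoop sql.toList false false)

-- ===== PORT B =====
-- B's chunk scan: at a quote, split off everything up to the matching quote (str.find =
-- takeWhile/dropWhile split) and emit that many spaces; otherwise copy the character.
def stripBLoop : List Char → List Char
  | [] => []
  | ch :: rest =>
    if ch = '\'' ∨ ch = '"' then
      let body := rest.takeWhile (· ≠ ch)
      match h : rest.dropWhile (· ≠ ch) with
      | [] => List.replicate (body.length + 1) ' '            -- unterminated: blank to end
      | _ :: r => List.replicate (body.length + 2) ' ' ++ stripBLoop r
    else ch :: stripBLoop rest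
termination_by cs => cs.length
decreasing_by
  · have h1 : (rest.dropWhile (· ≠ ch)).length ≤ rest.length :=
      (List.dropWhile_sublist _).length_le
    rw [h] at h1; simp at h1 ⊢; omega
  · simp

def strip_string_literals_py_alt (sql : String) : String :=
  String.mk (stripBLoop sql.toList)

-- ===== PRECONDITION & SPEC =====
def Spec_strip_string_literals_py (sql : String) (out : String) : Prop := out = strip_string_literals_py_alt sql
instance (sql : String) (out : String) : Decidable (Spec_strip_string_literals_py sql out) := by unfold Spec_strip_string_literals_py; infer_instance

-- ===== CLAIM (what is proved, stated in full; the proofs are below) =====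
def Claim_equal_strip_string_literals_py : Prop := ∀ (sql : String), Dom_strip_string_literals_py sql → Spec_strip_string_literals_py sql (strip_string_literals_py sql)

-- ===== LEMMAS AND PROOFS =====

-- Inside a single-quoted literal A blanks every character (including '"') until the
-- closing '\'' , which is blanked and returns the machine to the neutral state.
theorem stripA_single (cs : List Char) :
    stripALoop cs true false =
      (cs.takeWhile (· ≠ '\'')).map (fun _ => ' ') ++
      (match cs.dropWhile (· ≠ '\'') with
       | [] => []
       | _ :: r => ' ' :: stripALoop r false false) := by
  induction cs with
  | nil => simp [stripALoop]
  | cons ch rest ih =>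
    by_cases hq : ch = '\''
    · subst hq; simp [stripALoop]
    · simp [stripALoop, hq, ih]

-- Symmetric fact for a double-quoted literal.
theorem stripA_double (cs : List Char) :
    stripALoop cs false true =
      (cs.takeWhile (· ≠ '"')).map (fun _ => ' ') ++
      (match cs.dropWhile (· ≠ '"') with
       | [] => []
       | _ :: r => ' ' :: stripALoop r false false) := by
  induction cs with
  | nil => simp [stripALoop]
  | cons ch rest ih =>
    by_cases hq : ch = '"'
    · subst hq; simp [stripALoop]
    · simp [stripALoop, hq, ih]

theorem map_const_space (l : List Char) :
    l.map (fun _ => ' ') = List.replicate l.length ' ' := by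
  induction l with
  | nil => simp
  | cons a l ih => simp [ih, List.replicate_succ]

theorem space_shift (k : Nat) :
    ' ' :: List.replicate k ' ' = List.replicate k ' ' ++ [' '] := by
  rw [← List.replicate_succ, List.replicate_succ']

theorem space_shift2 (k : Nat) (X : List Char) :
    ' ' :: (List.replicate k ' ' ++ ' ' :: X) = List.replicate (k + 2) ' ' ++ X := by
  induction k with
  | zero => simp [List.replicate_succ]
  | succ m ih => simp [List.replicate_succ] at ih ⊢; simpa using ih

-- The two loops agree from the neutral state.
theorem stripA_eq_stripB (cs : List Char) :
    stripALoop cs false false = stripBLoop cs := by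
  induction hn : cs.length using Nat.strong_induction_on generalizing cs with
  | _ n ih =>
    match cs, hn with
    | [], _ => simp [stripALoop, stripBLoop]
    | ch :: rest, hn =>
      by_cases h1 : ch = '\''
      · subst h1
        rw [stripBLoop]
        simp only [if_pos (Or.inl rfl)]
        have hmode := stripA_single rest
        cases hdw : rest.dropWhile (· ≠ '\'') with
        | nil =>
          simp only [hdw] at hmode
          simp [stripALoop, hmode, map_const_space, space_shift, List.replicate_succ']
        | cons x r =>
          have hlen : (x :: r).length ≤ rest.length := by
            rw [← hdw]; exact (List.dropWhile_sublist _).length_le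
          have hr : r.length < n := by simp at hlen hn; omega
          simp only [hdw] at hmode
          simp [stripALoop, hmode, map_const_space, space_shift2,
                ih r.length hr r rfl]
      · by_cases h2 : ch = '"'
        · subst h2
          rw [stripBLoop]
          simp only [if_pos (Or.inr rfl)]
          have hmode := stripA_double rest
          cases hdw : rest.dropWhile (· ≠ '"') with
          | nil =>
            simp only [hdw] at hmode
            simp [stripALoop, hmode, map_const_space, space_shift, List.replicate_succ']
          | cons x r =>
            have hlen : (x :: r).length ≤ rest.length := by
              rw [← hdw]; exact (List.dropWhile_sublist _).length_le
            have hr : r.length < n := by simp at hlen hn; omega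
            simp only [hdw] at hmode
            simp [stripALoop, hmode, map_const_space, space_shift2,
                  ih r.length hr r rfl]
        · have hr : rest.length < n := by simp at hn; omega
          simp [stripALoop, stripBLoop, h1, h2, ih rest.length hr rest rfl]

-- ===== VERDICT (by name: the statement is the Claim_ definition above) =====
theorem strip_string_literals_py_spec : Claim_equal_strip_string_literals_py := by
  intro sql _
  unfold Spec_strip_string_literals_py strip_string_literals_py strip_string_literals_py_alt
  rw [stripA_eq_stripB]
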